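-- pv_equiv track=rewrite | github.com/Sallyrideauto/Leetcode | 1717-maximum-score-from-removing-substrings/1717-maximum-score-from-removing-substrings.py | maximumGain
-- ===== SOURCE A (Python) =====
-- def maximumGain(s: str, x: int, y: int) -> int:
--     def remove_substrings(s, first, second, score):
--         stack = []
--         current_score = 0
--         for char in s:
--             if stack and stack[-1] == first and char == second:
--                 stack.pop()
--                 current_score += score
--             else:
--                 stack.append(char)
--         return ''.join(stack), current_score
--
--     # 먼저 더 높은 점수를 주는 부분 문자열을 제거
--     if x > y:
--         s, score1 = remove_substrings(s, 'a', 'b', x)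
--         _, score2 = remove_substrings(s, 'b', 'a', y)
--     else:
--         s, score1 = remove_substrings(s, 'b', 'a', y)
--         _, score2 = remove_substrings(s, 'a', 'b', x)
--
--     return score1 + score2
-- ===== SOURCE B (Python) =====
-- def maximumGain(s: str, x: int, y: int) -> int:
--     # One pass with integer counters per maximal a/b segment; no stack, no string rebuilding.
--     if x > y:
--         first, second, hi, lo = 'a', 'b', x, y
--     else:
--         first, second, hi, lo = 'b', 'a', y, x
--     total = 0
--     uf = 0  # unmatched `first` chars in the current segment
--     us = 0  # unmatched `second` chars in the current segment
--     for c in s: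
--         if c == second:
--             if uf > 0:
--                 total += hi
--                 uf -= 1
--             else:
--                 us += 1
--         elif c == first:
--             uf += 1
--         else:
--             total += lo * min(uf, us)
--             uf = us = 0
--     return total + lo * min(uf, us)
-- ===== Notes on version B (the rewrite author's own statement) =====
-- stated objective: alternative
-- what changed: Replaced A's two stack passes (build a stack, join it into a new string, scan it again) by a single left-to-right pass keeping three integer counters (total, unmatched-first, unmatched-second) per maximal a/b run, flushing lo*min(uf,us) at each separator and at the end.
import Mathlib
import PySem

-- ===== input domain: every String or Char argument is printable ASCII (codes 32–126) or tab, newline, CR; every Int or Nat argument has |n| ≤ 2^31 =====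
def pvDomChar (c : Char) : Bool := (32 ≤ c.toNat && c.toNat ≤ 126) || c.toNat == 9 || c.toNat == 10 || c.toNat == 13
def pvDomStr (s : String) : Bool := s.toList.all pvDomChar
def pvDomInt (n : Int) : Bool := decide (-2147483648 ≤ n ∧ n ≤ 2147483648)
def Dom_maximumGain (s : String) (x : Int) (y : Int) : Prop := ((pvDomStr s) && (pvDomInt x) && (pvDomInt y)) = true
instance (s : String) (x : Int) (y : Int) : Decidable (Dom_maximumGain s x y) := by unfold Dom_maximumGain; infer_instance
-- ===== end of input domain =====

-- B replaces A's two stack-and-rebuild passes by a single pass keeping three integer counters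
-- per maximal run of 'a'/'b' characters (objective: alternative algorithm, same O(n) cost).

-- ===== PORT A =====
-- The Python stack (append/pop at the right end) is represented head-as-top; the joined
-- string ''.join(stack) is represented by its character list stack.reverse (bottom-to-top).
def pvStep (first second : Char) (score : Int) (st : List Char × Int) (c : Char) : List Char × Int :=
  match st with
  | (stack, cur) =>
    -- 'if stack and stack[-1] == first and char == second' (head? = some first implies nonempty)
    if stack.head? = some first ∧ c = second then (stack.tail, cur + score)
    else (c :: stack, cur)

def removeSubstrings (s : List Char) (first second : Char) (score : Int) : List Char × Int :=
  let r := s.foldl (pvStep first second score) ([], 0)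
  (r.1.reverse, r.2)

def maximumGain (s : String) (x : Int) (y : Int) : Int :=
  if x > y then
    let r1 := removeSubstrings s.toList 'a' 'b' x
    let r2 := removeSubstrings r1.1 'b' 'a' y
    r1.2 + r2.2
  else
    let r1 := removeSubstrings s.toList 'b' 'a' y
    let r2 := removeSubstrings r1.1 'a' 'b' x
    r1.2 + r2.2

-- ===== PORT B =====
-- state = (total, uf, us): score so far, unmatched `first` and `second` chars of the current segment
def pvBStep (first second : Char) (hi lo : Int) (st : Int × Int × Int) (c : Char) : Int × Int × Int :=
  match st with
  | (total, uf, us) =>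
    if c = second then
      if uf > 0 then (total + hi, uf - 1, us) else (total, uf, us + 1)
    else if c = first then (total, uf + 1, us)
    else (total + lo * min uf us, 0, 0)

def maximumGain_alt (s : String) (x : Int) (y : Int) : Int :=
  let p := if x > y then ('a', 'b', x, y) else ('b', 'a', y, x)
  let r := s.toList.foldl (pvBStep p.1 p.2.1 p.2.2.1 p.2.2.2) (0, 0, 0)
  r.1 + p.2.2.2 * min r.2.1 r.2.2

-- ===== PRECONDITION & SPEC =====
def Spec_maximumGain (s : String) (x : Int) (y : Int) (out : Int) : Prop := out = maximumGain_alt s x y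
instance (s : String) (x : Int) (y : Int) (out : Int) : Decidable (Spec_maximumGain s x y out) := by unfold Spec_maximumGain; infer_instance

-- ===== CLAIM (what is proved, stated in full; the proofs are below) =====
def Claim_equal_maximumGain : Prop := ∀ (s : String) (x : Int) (y : Int), Dom_maximumGain s x y → Spec_maximumGain s x y (maximumGain s x y)

-- ===== LEMMAS AND PROOFS =====

-- score of A's SECOND pass (pattern s2·f, value lo) run on stack st (head-as-top)
def pvP2 (f s2 : Char) (lo : Int) (st : List Char) : Int :=
  (st.reverse.foldl (pvStep s2 f lo) ([], 0)).2

-- the portion of A's stack below the current a/b segment: empty or topped by a separator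
def pvTOk (f s2 : Char) (t : List Char) : Prop :=
  t = [] ∨ ∃ c t', t = c :: t' ∧ c ≠ f ∧ c ≠ s2

theorem pvStep_push (fst snd : Char) (sc : Int) (σ : List Char) (a : Int) (c : Char)
    (h : c ≠ snd) : pvStep fst snd sc (σ, a) c = (c :: σ, a) := by
  simp [pvStep, h]

theorem pvL1 (f s2 : Char) (lo : Int) (hne : f ≠ s2) :
    ∀ (m : ℕ) (σ : List Char) (a : Int),
      (List.replicate m s2).foldl (pvStep s2 f lo) (σ, a) = (List.replicate m s2 ++ σ, a) := by
  intro m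
  induction m with
  | zero => intro σ a; simp
  | succ k ih =>
    intro σ a
    have hne' : s2 ≠ f := fun h => hne h.symm
    simp only [List.replicate_succ, List.foldl_cons, pvStep_push s2 f lo σ a s2 hne']
    rw [ih]
    rw [show (s2 :: σ) = [s2] ++ σ from rfl, ← List.append_assoc, ← List.replicate_succ',
      List.replicate_succ]

theorem pvL2 (f s2 : Char) (lo : Int) (hne : f ≠ s2) :
    ∀ (n m : ℕ) (σ : List Char) (a : Int), σ.head? ≠ some s2 →
      ((List.replicate n f).foldl (pvStep s2 f lo) (List.replicate m s2 ++ σ, a)).2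
        = a + lo * (min n m : ℕ) := by
  intro n
  induction n with
  | zero => intro m σ a _; simp
  | succ k ih =>
    intro m σ a hσ
    cases m with
    | zero =>
      simp only [List.replicate_succ, List.foldl_cons, List.replicate_zero, List.nil_append]
      have : pvStep s2 f lo (σ, a) f = (f :: σ, a) := by
        simp only [pvStep]
        rw [if_neg]
        rintro ⟨h1, _⟩; exact hσ h1
      rw [this]
      have := ih 0 (f :: σ) a (by simp [hne])
      simpa using this
    | succ j =>
      simp only [List.replicate_succ, List.foldl_cons, List.cons_append]
      have : pvStep s2 f lo (s2 :: (List.replicate j s2 ++ σ), a) f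
          = (List.replicate j s2 ++ σ, a + lo) := by
        simp [pvStep]
      rw [this, ih j σ (a + lo) hσ]
      have hmin : min (k + 1) (j + 1) = min k j + 1 := by omega
      rw [hmin]
      push_cast
      ring

theorem pvTail_head (f s2 : Char) (lo : Int) (t : List Char) (ht : pvTOk f s2 t) :
    (t.reverse.foldl (pvStep s2 f lo) ([], 0)).1.head? ≠ some s2 := by
  rcases ht with rfl | ⟨c, t', rfl, hcf, hcs⟩
  · simp
  · simp only [List.reverse_cons, List.foldl_append, List.foldl_cons, List.foldl_nil]
    rcases h : t'.reverse.foldl (pvStep s2 f lo) ([], 0) with ⟨σ, a⟩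
    rw [pvStep_push s2 f lo σ a c hcf]
    simp [hcs]

theorem pvKey (f s2 : Char) (lo : Int) (hne : f ≠ s2) (n m : ℕ) (t : List Char)
    (ht : pvTOk f s2 t) :
    pvP2 f s2 lo (List.replicate n f ++ List.replicate m s2 ++ t)
      = lo * (min n m : ℕ) + pvP2 f s2 lo t := by
  unfold pvP2
  rw [List.reverse_append, List.reverse_append, List.reverse_replicate, List.reverse_replicate,
    List.foldl_append, List.foldl_append]
  rcases h : t.reverse.foldl (pvStep s2 f lo) ([], 0) with ⟨σ, a⟩
  have hσ : σ.head? ≠ some s2 := by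
    have := pvTail_head f s2 lo t ht; rw [h] at this; exact this
  rw [pvL1 f s2 lo hne m σ a, pvL2 f s2 lo hne n m σ a hσ]
  ring

theorem pvP2_cons (f s2 : Char) (lo : Int) (c : Char) (X : List Char) (hcf : c ≠ f) :
    pvP2 f s2 lo (c :: X) = pvP2 f s2 lo X := by
  unfold pvP2
  simp only [List.reverse_cons, List.foldl_append, List.foldl_cons, List.foldl_nil]
  rcases h : X.reverse.foldl (pvStep s2 f lo) ([], 0) with ⟨σ, a⟩
  rw [pvStep_push s2 f lo σ a c hcf]

theorem pvMain (f s2 : Char) (hi lo : Int) (hne : f ≠ s2) :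
    ∀ (cs : List Char) (n m : ℕ) (t : List Char) (sc tot : Int), pvTOk f s2 t →
      (cs.foldl (pvStep f s2 hi) (List.replicate n f ++ List.replicate m s2 ++ t, sc)).2
        + pvP2 f s2 lo (cs.foldl (pvStep f s2 hi) (List.replicate n f ++ List.replicate m s2 ++ t, sc)).1
      = (let b := cs.foldl (pvBStep f s2 hi lo) (tot, (n : Int), (m : Int));
          b.1 + lo * min b.2.1 b.2.2) + (sc - tot) + pvP2 f s2 lo t := by
  intro cs
  induction cs with
  | nil =>
    intro n m t sc tot ht
    simp only [List.foldl_nil]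
    rw [pvKey f s2 lo hne n m t ht]
    have : (min (n : Int) (m : Int)) = ((min n m : ℕ) : Int) := by
      simp [Nat.cast_min]
    rw [this]; ring
  | cons c cs ih =>
    intro n m t sc tot ht
    simp only [List.foldl_cons]
    by_cases hc2 : c = s2
    · subst hc2
      cases n with
      | zero =>
        have hA : pvStep f c hi (List.replicate 0 f ++ List.replicate m c ++ t, sc) c
            = (List.replicate 0 f ++ List.replicate (m + 1) c ++ t, sc) := by
          simp only [pvStep, List.replicate_zero, List.nil_append]
          rw [if_neg]
          · simp [List.replicate_succ]
          · rintro ⟨h1, _⟩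
            cases m with
            | zero =>
              rcases ht with rfl | ⟨d, t', rfl, hdf, hds⟩
              · simp at h1
              · simp at h1; exact hdf h1
            | succ j => simp [List.replicate_succ] at h1; exact hne h1.symm
        have hB : pvBStep f c hi lo (tot, ((0 : ℕ) : Int), (m : Int)) c
            = (tot, ((0 : ℕ) : Int), ((m + 1 : ℕ) : Int)) := by
          simp [pvBStep]
        rw [hA, hB, ih 0 (m + 1) t sc tot ht]
      | succ k =>
        have hA : pvStep f c hi (List.replicate (k + 1) f ++ List.replicate m c ++ t, sc) c
            = (List.replicate k f ++ List.replicate m c ++ t, sc + hi) := by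
          simp [pvStep, List.replicate_succ]
        have hB : pvBStep f c hi lo (tot, ((k + 1 : ℕ) : Int), (m : Int)) c
            = (tot + hi, ((k : ℕ) : Int), (m : Int)) := by
          have hpos : ((k + 1 : ℕ) : Int) > 0 := by push_cast; omega
          simp only [pvBStep, if_true, if_pos hpos, Prod.mk.injEq]
          exact ⟨trivial, by push_cast; ring, trivial⟩
        rw [hA, hB, ih k m t (sc + hi) (tot + hi) ht]
        ring_nf
    · by_cases hc1 : c = f
      · subst hc1
        have hA : pvStep c s2 hi (List.replicate n c ++ List.replicate m s2 ++ t, sc) c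
            = (List.replicate (n + 1) c ++ List.replicate m s2 ++ t, sc) := by
          rw [pvStep_push c s2 hi _ sc c hc2]
          simp [List.replicate_succ]
        have hB : pvBStep c s2 hi lo (tot, (n : Int), (m : Int)) c
            = (tot, ((n + 1 : ℕ) : Int), (m : Int)) := by
          simp only [pvBStep, if_neg hc2, if_true, Prod.mk.injEq]
          exact ⟨trivial, by push_cast; ring, trivial⟩
        rw [hA, hB, ih (n + 1) m t sc tot ht]
      · -- separator: flush the segment
        have hA : pvStep f s2 hi (List.replicate n f ++ List.replicate m s2 ++ t, sc) c
            = (List.replicate 0 f ++ List.replicate 0 s2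
                ++ (c :: (List.replicate n f ++ List.replicate m s2 ++ t)), sc) := by
          rw [pvStep_push f s2 hi _ sc c hc2]
          simp
        have hB : pvBStep f s2 hi lo (tot, (n : Int), (m : Int)) c
            = (tot + lo * min (n : Int) (m : Int), ((0 : ℕ) : Int), ((0 : ℕ) : Int)) := by
          simp [pvBStep, hc2, hc1]
        have ht' : pvTOk f s2 (c :: (List.replicate n f ++ List.replicate m s2 ++ t)) :=
          Or.inr ⟨c, _, rfl, hc1, hc2⟩
        rw [hA, hB, ih 0 0 _ sc (tot + lo * min (n : Int) (m : Int)) ht']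
        rw [pvP2_cons f s2 lo c _ hc1, pvKey f s2 lo hne n m t ht]
        have : (min (n : Int) (m : Int)) = ((min n m : ℕ) : Int) := by simp [Nat.cast_min]
        rw [this]; ring

theorem pvBranch (f s2 : Char) (hi lo : Int) (hne : f ≠ s2) (cs : List Char) :
    (cs.foldl (pvStep f s2 hi) ([], 0)).2
      + (((cs.foldl (pvStep f s2 hi) ([], 0)).1.reverse).foldl (pvStep s2 f lo) ([], 0)).2
    = (let b := cs.foldl (pvBStep f s2 hi lo) (0, 0, 0);
        b.1 + lo * min b.2.1 b.2.2) := by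
  have := pvMain f s2 hi lo hne cs 0 0 [] 0 0 (Or.inl rfl)
  simp only [List.replicate_zero, List.nil_append, Nat.cast_zero] at this
  have h0 : pvP2 f s2 lo ([] : List Char) = 0 := by simp [pvP2]
  rw [h0] at this
  unfold pvP2 at this
  simpa using this

-- ===== VERDICT (by name: the statement is the Claim_ definition above) =====
theorem maximumGain_spec : Claim_equal_maximumGain := by
  intro s x y _
  unfold Spec_maximumGain maximumGain maximumGain_alt removeSubstrings
  by_cases h : x > y
  · simp only [if_pos h]
    exact pvBranch 'a' 'b' x y (by decide) s.toList
  · simp only [if_neg h]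
    exact pvBranch 'b' 'a' y x (by decide) s.toList
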